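-- pv_equiv track=rewrite | github.com/solsoleee/Algorithm | baeckjoon/2840.py | solution
-- ===== SOURCE A (Python) =====
-- def solution(n, record):
--     wheel=["?"]*n #현재 바퀴
--     for r in record:
--         s =int(r[0])%n
--         s_char=str(r[1])
--
--         #큐가 아닌 리스트를 슬라이싱 한 후에 앞뒤 순서를 바꿔 다시 붙임
--         wheel = wheel[-s:] + wheel[:-s]
--
--         if wheel[0] == '?': #아무것도 없을 때
--             if s_char in wheel: #지금 나온 문자가 있을 때
--                 return '!'
--             wheel[0] = s_char
--         elif wheel[0] == s_char: #같은게 나올 때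
--             continue
--         else:
--             return '!'
--     else:
--         return("".join(wheel))
-- ===== SOURCE B (Python) =====
-- def solution(n, record):
--     if not record:
--         return "?" * n
--     off = 0
--     placed = {}   # original wheel position -> string written there
--     used = set()  # strings already placed somewhere on the wheel
--     for r in record:
--         s = int(r[0])
--         ch = str(r[1])
--         off = (off + s) % n
--         p = (-off) % n          # original index currently at the top
--         if p in placed:
--             if placed[p] != ch:
--                 return '!'
--         else:
--             if ch == '?' or ch in used:
--                 return '!'
--             placed[p] = ch
--             used.add(ch)
--     return "".join(placed.get((j - off) % n, '?') for j in range(n))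
-- ===== Notes on version B (the rewrite author's own statement) =====
-- stated objective: faster
-- what changed: Instead of physically rotating the wheel by list slicing and scanning it at every record, B keeps a cumulative rotation offset modulo n plus a dict position->letter and a set of placed letters, and reconstructs the final wheel once at the end.
import Mathlib
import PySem

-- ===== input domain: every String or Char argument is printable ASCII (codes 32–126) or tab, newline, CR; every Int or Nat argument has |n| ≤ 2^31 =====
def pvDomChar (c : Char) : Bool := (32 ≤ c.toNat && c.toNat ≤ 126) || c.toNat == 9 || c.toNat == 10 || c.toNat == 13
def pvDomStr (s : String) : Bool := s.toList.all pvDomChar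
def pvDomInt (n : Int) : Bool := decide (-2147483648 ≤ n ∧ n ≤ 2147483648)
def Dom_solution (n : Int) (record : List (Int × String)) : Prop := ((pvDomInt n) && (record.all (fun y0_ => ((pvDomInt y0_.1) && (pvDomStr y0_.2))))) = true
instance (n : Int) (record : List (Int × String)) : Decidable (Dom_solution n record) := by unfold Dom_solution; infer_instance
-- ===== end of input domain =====

-- B replaces A's per-step list slicing and scanning by a cumulative rotation offset, a
-- position→letter dict and a set of placed letters, reconstructing the wheel once at the end.

-- ===== PORT A =====
def solutionLoop (n : Int) (wheel : List String) : List (Int × String) → String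
  | [] => PySem.Str.join "" wheel                       -- "".join(wheel)
  | r :: rest =>
    let s := PySem.Int.mod r.1 n                        -- s = int(r[0]) % n
    -- wheel = wheel[-s:] + wheel[:-s]
    let w := PySem.List.slice wheel (some (-s)) none ++ PySem.List.slice wheel none (some (-s))
    match PySem.List.pyGet? w 0 with                    -- wheel[0]
    | none => "!"                                       -- IndexError on empty wheel (outside Pre_)
    | some w0 =>
      if w0 = "?" then
        if r.2 ∈ w then "!"
        else solutionLoop n (PySem.List.pySetD w 0 r.2) rest   -- wheel[0] = s_char
      else if w0 = r.2 then solutionLoop n w rest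
      else "!"

def solution (n : Int) (record : List (Int × String)) : String :=
  solutionLoop n (PySem.List.pyRepeat ["?"] n) record   -- wheel = ["?"] * n

-- ===== PORT B =====
def altFinish (n off : Int) (placed : PySem.Dict Int String) : String :=
  PySem.Str.join "" ((PySem.List.pyRange 0 n).map (fun j => placed.getD (PySem.Int.mod (j - off) n) "?"))

def altLoop (n : Int) (off : Int) (placed : PySem.Dict Int String) (used : PySem.Set String) :
    List (Int × String) → String
  | [] => altFinish n off placed
  | r :: rest =>
    let off' := PySem.Int.mod (off + r.1) n             -- off = (off + s) % n
    let p := PySem.Int.mod (-off') n                    -- p = (-off) % n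
    match placed.get? p with
    | some c => if c ≠ r.2 then "!" else altLoop n off' placed used rest
    | none =>
      if r.2 = "?" ∨ r.2 ∈ used then "!"
      else altLoop n off' (placed.insert p r.2) (PySem.Set.add used r.2) rest

def solution_alt (n : Int) (record : List (Int × String)) : String :=
  match record with
  | [] => String.ofList (List.replicate n.toNat '?')    -- "?" * n
  | _ :: _ => altLoop n 0 PySem.Dict.empty PySem.Set.empty record

-- ===== PRECONDITION & SPEC =====
-- Pre_ excludes n ≤ 0 with a nonempty record: there A raises (ZeroDivisionError on '% n'
-- for n == 0, IndexError on 'wheel[0]' for n < 0, since the wheel list is empty).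
def Pre_solution (n : Int) (record : List (Int × String)) : Prop := record = [] ∨ 1 ≤ n
instance (n : Int) (record : List (Int × String)) : Decidable (Pre_solution n record) := by unfold Pre_solution; infer_instance
def pvWitness_solution : Int × (List (Int × String)) := (3, [(2, "a"), (5, "b")])

def Spec_solution (n : Int) (record : List (Int × String)) (out : String) : Prop := out = solution_alt n record
instance (n : Int) (record : List (Int × String)) (out : String) : Decidable (Spec_solution n record out) := by unfold Spec_solution; infer_instance

-- ===== CLAIM (what is proved, stated in full; the proofs are below) =====
def Claim_equal_solution : Prop := ∀ (n : Int) (record : List (Int × String)), Dom_solution n record → Pre_solution n record → Spec_solution n record (solution n record)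

-- ===== LEMMAS AND PROOFS =====

-- A's wheel after the rotations so far, expressed through B's state (offset + dict).
def wheelOf (n off : Int) (placed : PySem.Dict Int String) : List String :=
  (List.range n.toNat).map (fun (j : Nat) => placed.getD (PySem.Int.mod ((j : Int) - off) n) "?")

-- invariant tying B's dict and set together: keys are wheel positions, values the placed
-- strings (never "?"), and `used` holds exactly the values.
def LoopInv (n : Int) (placed : PySem.Dict Int String) (used : PySem.Set String) : Prop :=
  (∀ p c, placed.get? p = some c → 0 ≤ p ∧ p < n ∧ c ≠ "?") ∧
  (∀ c, c ∈ used ↔ ∃ p, placed.get? p = some c)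

theorem emod_sub_left (a b n : Int) : (a % n - b) % n = (a - b) % n := by
  rw [Int.sub_emod, Int.emod_emod_of_dvd _ dvd_rfl, ← Int.sub_emod]

theorem emod_sub_right (a b n : Int) : (a - b % n) % n = (a - b) % n := by
  rw [Int.sub_emod, Int.emod_emod_of_dvd _ dvd_rfl, ← Int.sub_emod]

theorem slices_rot {α : Type} (xs : List α) (s : Int) (h0 : 0 ≤ s) (h1 : s ≤ xs.length) :
    PySem.List.slice xs (some (-s)) none ++ PySem.List.slice xs none (some (-s))
      = xs.drop (xs.length - s.toNat) ++ xs.take (xs.length - s.toNat) := by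
  obtain ⟨k, rfl⟩ := Int.eq_ofNat_of_zero_le h0
  cases k with
  | zero => simp [PySem.List.slice_zero_start, PySem.List.slice_none_none,
      PySem.List.slice_to (xs := xs) (b := 0) le_rfl]
  | succ m =>
    rw [PySem.List.slice_from_neg_natCast xs (m + 1) (Nat.succ_pos m),
        PySem.List.slice_to_neg_natCast xs (m + 1) (Nat.succ_pos m)]
    simp

theorem rot_index {α : Type} (f : Nat → α) (N k : Nat) (hk : k ≤ N) :
    ((List.range N).map f).drop (N - k) ++ ((List.range N).map f).take (N - k)
      = (List.range N).map (fun i => f ((i + (N - k)) % N)) := by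
  apply List.ext_getElem
  · simp
  · intro i hi1 hi2
    have hiN : i < N := by simpa using hi2
    by_cases h : i < k
    · rw [List.getElem_append_left (by simp; omega)]
      simp only [List.getElem_drop, List.getElem_map, List.getElem_range]
      congr 1
      rw [Nat.mod_eq_of_lt (by omega)]
      omega
    · rw [List.getElem_append_right (by simp; omega)]
      simp only [List.getElem_take, List.getElem_map, List.getElem_range,
        List.length_drop, List.length_map, List.length_range]
      congr 1
      have h2 : i + (N - k) = (i - k) + 1 * N := by omega
      rw [h2, Nat.add_mul_mod_self_right, Nat.mod_eq_of_lt (by omega)]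
      omega

theorem wheel_rot (n off r1 : Int) (hn : 1 ≤ n) (placed : PySem.Dict Int String) :
    PySem.List.slice (wheelOf n off placed) (some (-(PySem.Int.mod r1 n))) none ++
      PySem.List.slice (wheelOf n off placed) none (some (-(PySem.Int.mod r1 n)))
      = wheelOf n (PySem.Int.mod (off + r1) n) placed := by
  have hn0 : (0 : Int) < n := by omega
  have hmod : PySem.Int.mod r1 n = r1 % n := PySem.Int.mod_eq_emod_of_pos hn0
  have hs0 : 0 ≤ r1 % n := Int.emod_nonneg _ (by omega)
  have hsn : r1 % n < n := Int.emod_lt_of_pos _ hn0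
  have hlen : (wheelOf n off placed).length = n.toNat := by simp [wheelOf]
  rw [hmod, slices_rot _ _ hs0 (by rw [hlen]; omega), hlen]
  unfold wheelOf
  rw [rot_index _ _ ((r1 % n).toNat) (by omega)]
  apply List.map_congr_left
  intro i hi
  have hiN : i < n.toNat := List.mem_range.mp hi
  congr 1
  have hcast : ((n.toNat - (r1 % n).toNat : Nat) : Int) = n - r1 % n := by omega
  rw [PySem.Int.mod_eq_emod_of_pos hn0, PySem.Int.mod_eq_emod_of_pos hn0,
      PySem.Int.mod_eq_emod_of_pos hn0]
  have h2 : (((i + (n.toNat - (r1 % n).toNat)) % n.toNat : Nat) : Int)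
      = ((i : Int) + (n - r1 % n)) % n := by
    push_cast
    rw [hcast]
    congr 1
    omega
  rw [h2, emod_sub_left]
  have h1 : (i : Int) + (n - r1 % n) - off = ((i : Int) - off - (r1 % n)) + n * 1 := by ring
  rw [h1, Int.add_mul_emod_self_left, emod_sub_right]
  conv_rhs => rw [emod_sub_right]
  congr 1
  ring

theorem wheel_get_zero (n off : Int) (hn : 1 ≤ n) (placed : PySem.Dict Int String) :
    PySem.List.pyGet? (wheelOf n off placed) 0
      = some (placed.getD (PySem.Int.mod (-off) n) "?") := by
  rw [PySem.List.pyGet?_zero]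
  unfold wheelOf
  rw [List.getElem?_map, List.getElem?_range (by omega)]
  simp

theorem wheel_mem (n off : Int) (hn : 1 ≤ n) (placed : PySem.Dict Int String)
    (used : PySem.Set String) (hInv : LoopInv n placed used)
    (htop : placed.get? (PySem.Int.mod (-off) n) = none) (c : String) :
    c ∈ wheelOf n off placed ↔ c = "?" ∨ c ∈ used := by
  have hn0 : (0 : Int) < n := by omega
  obtain ⟨hkeys, hused⟩ := hInv
  constructor
  · intro hc
    unfold wheelOf at hc
    obtain ⟨j, _, hj⟩ := List.mem_map.mp hc
    rw [PySem.Dict.getD_eq_get?_getD] at hj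
    cases hg : placed.get? (PySem.Int.mod ((j : Int) - off) n) with
    | none => left; rw [hg] at hj; simpa using hj.symm
    | some v =>
      right
      rw [hg] at hj; simp at hj
      subst hj
      exact (hused _).mpr ⟨_, hg⟩
  · intro hc
    unfold wheelOf
    rcases hc with hq | hu
    · subst hq
      refine List.mem_map.mpr ⟨0, List.mem_range.mpr (by omega), ?_⟩
      have h0 : PySem.Int.mod (((0 : Nat) : Int) - off) n = PySem.Int.mod (-off) n := by
        norm_num
      rw [h0, PySem.Dict.getD_eq_get?_getD, htop]
      rfl
    · obtain ⟨q, hq⟩ := (hused c).mp hu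
      obtain ⟨hq0, hqn, _⟩ := hkeys q c hq
      refine List.mem_map.mpr ⟨((q + off) % n).toNat, List.mem_range.mpr ?_, ?_⟩
      · have h1 : 0 ≤ (q + off) % n := Int.emod_nonneg _ (by omega)
        have h2 : (q + off) % n < n := Int.emod_lt_of_pos _ hn0
        omega
      · have h1 : 0 ≤ (q + off) % n := Int.emod_nonneg _ (by omega)
        have hcast : ((((q + off) % n).toNat : Nat) : Int) = (q + off) % n := by omega
        rw [PySem.Int.mod_eq_emod_of_pos hn0, hcast, emod_sub_left,
            Int.add_sub_cancel, Int.emod_eq_of_lt hq0 hqn,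
            PySem.Dict.getD_eq_get?_getD, hq]
        rfl

theorem wheel_set (n off : Int) (hn : 1 ≤ n) (placed : PySem.Dict Int String) (v : String) :
    PySem.List.pySetD (wheelOf n off placed) 0 v
      = wheelOf n off (placed.insert (PySem.Int.mod (-off) n) v) := by
  have hn0 : (0 : Int) < n := by omega
  have hlen : 0 < (wheelOf n off placed).length := by simp [wheelOf]; omega
  have hset : PySem.List.pySetD (wheelOf n off placed) 0 v
      = (wheelOf n off placed).set 0 v := by
    simp [PySem.List.pySetD, PySem.List.pySet?, PySem.List.pyIdx?, hlen]
  rw [hset]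
  apply List.ext_getElem
  · simp [wheelOf]
  · intro i hi1 hi2
    have hiN : i < n.toNat := by simpa [wheelOf] using hi2
    by_cases h0 : i = 0
    · subst h0
      rw [List.getElem_set_self]
      unfold wheelOf
      rw [List.getElem_map, List.getElem_range]
      have he : PySem.Int.mod (((0 : Nat) : Int) - off) n = PySem.Int.mod (-off) n := by
        norm_num
      rw [he, PySem.Dict.getD_eq_get?_getD, PySem.Dict.get?_insert_self]
      rfl
    · rw [List.getElem_set_ne (by omega)]
      unfold wheelOf
      rw [List.getElem_map, List.getElem_range, List.getElem_map, List.getElem_range]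
      rw [PySem.Dict.getD_eq_get?_getD, PySem.Dict.getD_eq_get?_getD,
          PySem.Dict.get?_insert_of_ne]
      intro hcontra
      rw [PySem.Int.mod_eq_emod_of_pos hn0, PySem.Int.mod_eq_emod_of_pos hn0] at hcontra
      have hdvd : n ∣ ((i : Int) - off - (-off)) := Int.ModEq.dvd (Int.ModEq.symm hcontra)
      have hdvd' : n ∣ (i : Int) := by
        have h : (i : Int) - off - (-off) = (i : Int) := by ring
        rwa [h] at hdvd
      have hle : n ≤ (i : Int) := Int.le_of_dvd (by omega) hdvd'
      omega

theorem inv_step (n : Int) (placed : PySem.Dict Int String)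
    (used : PySem.Set String) (hInv : LoopInv n placed used) (p : Int) (v : String)
    (hpn : placed.get? p = none) (hp0 : 0 ≤ p) (hpl : p < n) (hv : v ≠ "?") :
    LoopInv n (placed.insert p v) (PySem.Set.add used v) := by
  obtain ⟨hkeys, hused⟩ := hInv
  constructor
  · intro q c hq
    rw [PySem.Dict.get?_insert] at hq
    by_cases hqp : q = p
    · rw [if_pos hqp] at hq
      simp at hq
      subst hq; subst hqp
      exact ⟨hp0, hpl, hv⟩
    · rw [if_neg hqp] at hq
      exact hkeys q c hq
  · intro c
    rw [PySem.Set.mem_add]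
    constructor
    · rintro (hc | hc)
      · obtain ⟨q, hq⟩ := (hused c).mp hc
        have hqp : q ≠ p := by intro h; rw [h, hpn] at hq; exact absurd hq (by simp)
        exact ⟨q, by rw [PySem.Dict.get?_insert, if_neg hqp]; exact hq⟩
      · subst hc
        exact ⟨p, PySem.Dict.get?_insert_self placed p c⟩
    · rintro ⟨q, hq⟩
      rw [PySem.Dict.get?_insert] at hq
      by_cases hqp : q = p
      · rw [if_pos hqp] at hq; simp at hq; right; exact hq.symm
      · rw [if_neg hqp] at hq; left; exact (hused c).mpr ⟨q, hq⟩

theorem loop_eq (n : Int) (hn : 1 ≤ n) (rest : List (Int × String)) :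
    ∀ (off : Int) (placed : PySem.Dict Int String) (used : PySem.Set String),
      LoopInv n placed used →
      solutionLoop n (wheelOf n off placed) rest = altLoop n off placed used rest := by
  have hn0 : (0 : Int) < n := by omega
  induction rest with
  | nil =>
    intro off placed used _
    show PySem.Str.join "" (wheelOf n off placed) = altFinish n off placed
    unfold altFinish wheelOf
    congr 1
    have hrange : PySem.List.pyRange 0 n
        = (List.range n.toNat).map (fun (k : Nat) => (k : Int)) := by
      conv_lhs => rw [show n = ((n.toNat : Nat) : Int) by omega]
      exact PySem.List.pyRange_zero_natCast n.toNat
    rw [hrange, List.map_map]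
    simp [Function.comp]
  | cons r rest ih =>
    intro off placed used hInv
    simp only [solutionLoop, altLoop]
    rw [wheel_rot n off r.1 hn placed, wheel_get_zero n _ hn placed]
    cases hp : placed.get? (PySem.Int.mod (-(PySem.Int.mod (off + r.1) n)) n) with
    | none =>
      have hgd : placed.getD (PySem.Int.mod (-(PySem.Int.mod (off + r.1) n)) n) "?" = "?" := by
        rw [PySem.Dict.getD_eq_get?_getD, hp]; rfl
      rw [hgd]
      dsimp only
      rw [if_pos rfl]
      by_cases hmem : r.2 ∈ wheelOf n (PySem.Int.mod (off + r.1) n) placed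
      · rw [if_pos hmem,
          if_pos ((wheel_mem n _ hn placed used hInv hp r.2).mp hmem)]
      · rw [if_neg hmem, if_neg (fun hc =>
          hmem ((wheel_mem n _ hn placed used hInv hp r.2).mpr hc))]
        rw [wheel_set n _ hn placed r.2]
        exact ih _ _ _ (inv_step n placed used hInv _ r.2 hp
          (PySem.Int.mod_nonneg _ hn0) (PySem.Int.mod_lt _ hn0)
          (fun h => hmem ((wheel_mem n _ hn placed used hInv hp r.2).mpr (Or.inl h))))
    | some c =>
      have hne : c ≠ "?" := (hInv.1 _ c hp).2.2
      have hgd : placed.getD (PySem.Int.mod (-(PySem.Int.mod (off + r.1) n)) n) "?" = c := by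
        rw [PySem.Dict.getD_eq_get?_getD, hp]; rfl
      rw [hgd]
      dsimp only
      rw [if_neg hne]
      by_cases hc : c = r.2
      · rw [if_pos hc, if_neg (by simpa using hc)]
        exact ih _ _ _ hInv
      · rw [if_neg hc, if_pos (by simpa using hc)]

theorem join_replicate (k : Nat) :
    PySem.Str.join "" (List.replicate k "?") = String.ofList (List.replicate k '?') := by
  unfold PySem.Str.join
  congr 1
  have h1 : (List.replicate k "?").map String.toList
      = (List.replicate k '?').map (fun c => [c]) := by
    simp [List.map_replicate]
  rw [h1]
  exact PySem.Chars.join_nil_singletons (List.replicate k '?')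

theorem wheel_init (n : Int) :
    PySem.List.pyRepeat ["?"] n = wheelOf n 0 PySem.Dict.empty := by
  rw [PySem.List.pyRepeat_singleton]
  unfold wheelOf
  have hconst : ∀ j ∈ List.range n.toNat,
      (PySem.Dict.empty : PySem.Dict Int String).getD
        (PySem.Int.mod ((j : Int) - 0) n) "?" = "?" := by
    intro j _
    rw [PySem.Dict.getD_eq_get?_getD, PySem.Dict.get?_empty]
    rfl
  rw [List.map_congr_left hconst, List.map_const', List.length_range]

-- ===== VERDICT (by name: the statement is the Claim_ definition above) =====
theorem solution_spec : Claim_equal_solution := by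
  intro n record _ hPre
  unfold Spec_solution
  cases record with
  | nil =>
    show solutionLoop n (PySem.List.pyRepeat ["?"] n) [] = _
    unfold solutionLoop solution_alt
    rw [PySem.List.pyRepeat_singleton]
    exact join_replicate n.toNat
  | cons r rest =>
    have hn : 1 ≤ n := by
      rcases hPre with h | h
      · exact absurd h (by simp)
      · exact h
    show solutionLoop n (PySem.List.pyRepeat ["?"] n) (r :: rest) = _
    rw [wheel_init n]
    have hInv : LoopInv n PySem.Dict.empty PySem.Set.empty := by
      constructor
      · intro p c h; rw [PySem.Dict.get?_empty] at h; exact absurd h (by simp)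
      · intro c
        constructor
        · intro h; exact absurd h (by simp [PySem.Set.empty])
        · rintro ⟨p, h⟩; rw [PySem.Dict.get?_empty] at h; exact absurd h (by simp)
    exact loop_eq n hn (r :: rest) 0 PySem.Dict.empty PySem.Set.empty hInv
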